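-- pv_equiv track=rewrite | github.com/ValentinaPasqual/wikidata_converter | get_all_artworks.py | wikidata_api_data_preparation
-- ===== SOURCE A (Python) =====
-- def wikidata_api_data_preparation(list_of_entities):
--     string = ''
--     result = []
--
--     x = 50
--     w = 0
--     while w < len(list_of_entities):
--         while w < x:
--             if w < len(list_of_entities):
--                 string += str(list_of_entities[w].replace('http://www.wikidata.org/entity/', '')) + '|'
--             w += 1
--         if x == w:
--             result.append(string[0:len(string) - 1])
--             string = ''
--         x += 50
--     return result
-- ===== SOURCE B (Python) =====
-- def wikidata_api_data_preparation(list_of_entities):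
--     result = []
--     for i in range(0, len(list_of_entities), 50):
--         chunk = list_of_entities[i:i + 50]
--         result.append('|'.join(e.replace('http://www.wikidata.org/entity/', '') for e in chunk))
--     return result
-- ===== Notes on version B (the rewrite author's own statement) =====
-- stated objective: simpler
-- what changed: Replaces the nested while-loops with manual w/x counters, a growing pipe-terminated accumulator string and a trailing-'|' strip by slice-based chunking (range with step 50) plus '|'.join over each chunk.
import Mathlib
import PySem

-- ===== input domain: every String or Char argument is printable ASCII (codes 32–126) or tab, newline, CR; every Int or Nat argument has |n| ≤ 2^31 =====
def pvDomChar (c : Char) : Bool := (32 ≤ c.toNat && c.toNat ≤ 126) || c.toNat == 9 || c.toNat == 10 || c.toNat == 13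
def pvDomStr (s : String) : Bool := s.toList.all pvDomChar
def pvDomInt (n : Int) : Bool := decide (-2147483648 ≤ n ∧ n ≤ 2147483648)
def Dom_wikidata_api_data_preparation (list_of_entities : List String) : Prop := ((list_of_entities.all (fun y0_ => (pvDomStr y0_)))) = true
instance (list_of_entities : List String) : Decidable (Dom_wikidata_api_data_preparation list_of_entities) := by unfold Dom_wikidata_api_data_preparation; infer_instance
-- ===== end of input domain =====

-- B replaces A's nested while-loops with manual counters and trailing-'|' strip by
-- slice-based chunking plus '|'.join (objective: simpler). Equivalent on all inputs.

-- ===== PORT A =====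
-- inner 'while w < x' loop: appends the stripped entity plus '|' for each in-range w
def wikidataInnerA (lst : List String) (w x : Nat) (s : List Char) : Nat × List Char :=
  if w < x then
    wikidataInnerA lst (w + 1) x
      (if _ : w < lst.length then
        s ++ PySem.Chars.replace (lst.getD w "").toList
              "http://www.wikidata.org/entity/".toList [] ++ ['|']
       else s)
  else (w, s)
termination_by x - w

-- outer 'while w < len' loop; fuel bounds the number of outer iterations (≤ length suffices)
def wikidataOuterA (lst : List String) (fuel : Nat) (w x : Nat) (s : List Char)
    (result : List String) : List String :=
  match fuel with
  | 0 => result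
  | fuel + 1 =>
    if w < lst.length then
      let p := wikidataInnerA lst w x s
      if x = p.1 then
        wikidataOuterA lst fuel p.1 (x + 50) []
          (result ++ [String.ofList (PySem.List.slice p.2 (some 0) (some ((p.2.length : Int) - 1)))])
      else
        wikidataOuterA lst fuel p.1 (x + 50) p.2 result
    else result

def wikidata_api_data_preparation (list_of_entities : List String) : List String :=
  wikidataOuterA list_of_entities list_of_entities.length 0 50 [] []

-- ===== PORT B =====
def wikidata_api_data_preparation_alt (list_of_entities : List String) : List String :=
  (PySem.List.pyRange 0 (list_of_entities.length : Int) 50).foldl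
    (fun result i =>
      result ++ [PySem.Str.join "|"
        ((PySem.List.slice list_of_entities (some i) (some (i + 50))).map
          (fun e => PySem.Str.replace e "http://www.wikidata.org/entity/" ""))])
    []

-- ===== PRECONDITION & SPEC =====
def Spec_wikidata_api_data_preparation (list_of_entities : List String) (out : List String) : Prop := out = wikidata_api_data_preparation_alt list_of_entities
instance (list_of_entities : List String) (out : List String) : Decidable (Spec_wikidata_api_data_preparation list_of_entities out) := by unfold Spec_wikidata_api_data_preparation; infer_instance

-- ===== CLAIM (what is proved, stated in full; the proofs are below) =====
def Claim_equal_wikidata_api_data_preparation : Prop := ∀ (list_of_entities : List String), Dom_wikidata_api_data_preparation list_of_entities → Spec_wikidata_api_data_preparation list_of_entities (wikidata_api_data_preparation list_of_entities)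

-- ===== LEMMAS AND PROOFS =====

-- the per-entity replacement, char level
def wikidataRep (e : String) : List Char :=
  PySem.Chars.replace e.toList "http://www.wikidata.org/entity/".toList []

-- A's accumulator for a block of entities: each stripped entity followed by '|'
def wikidataCat (c : List String) : List Char :=
  (c.map (fun e => wikidataRep e ++ ['|'])).flatten

-- the common specification: the chunks from index 50*k on
def wikidataChunks (lst : List String) (k : Nat) : List String :=
  if 50 * k < lst.length then
    PySem.Str.join "|" (((lst.drop (50 * k)).take 50).map
      (fun e => PySem.Str.replace e "http://www.wikidata.org/entity/" "")) :: wikidataChunks lst (k + 1)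
  else []
termination_by lst.length - 50 * k
decreasing_by omega

lemma wikidataCat_ne_nil (a : String) (c : List String) : wikidataCat (a :: c) ≠ [] := by
  simp [wikidataCat]

lemma wikidataCat_dropLast (c : List String) (h : c ≠ []) :
    (wikidataCat c).dropLast =
      PySem.Chars.join ['|'] (c.map (fun e => wikidataRep e)) := by
  induction c with
  | nil => simp at h
  | cons a t ih =>
    cases t with
    | nil =>
      simp [wikidataCat, PySem.Chars.join_singleton]
    | cons b r =>
      have h2 : wikidataCat (b :: r) ≠ [] := wikidataCat_ne_nil b r
      have : wikidataCat (a :: b :: r) = (wikidataRep a ++ ['|']) ++ wikidataCat (b :: r) := by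
        simp [wikidataCat]
      rw [this, List.dropLast_append_of_ne_nil h2, ih (by simp)]
      conv_rhs => rw [List.map_cons, List.map_cons, PySem.Chars.join_cons_cons]
      simp

lemma wikidataInnerA_spec (lst : List String) :
    ∀ x w s, w ≤ x →
      wikidataInnerA lst w x s = (x, s ++ wikidataCat ((lst.drop w).take (x - w))) := by
  intro x
  have H : ∀ d w s, x - w = d → w ≤ x →
      wikidataInnerA lst w x s = (x, s ++ wikidataCat ((lst.drop w).take (x - w))) := by
    intro d
    induction d with
    | zero =>
      intro w s hd hle
      have hwx : w = x := by omega
      rw [wikidataInnerA]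
      simp [hwx, wikidataCat]
    | succ d ih =>
      intro w s hd hle
      have hwlt : w < x := by omega
      rw [wikidataInnerA, if_pos hwlt]
      by_cases hw : w < lst.length
      · rw [ih (w + 1) _ (by omega) (by omega)]
        have hdrop : lst.drop w = lst[w] :: lst.drop (w + 1) := List.drop_eq_getElem_cons hw
        have htake : (lst.drop w).take (x - w) = lst[w] :: (lst.drop (w + 1)).take (x - (w + 1)) := by
          rw [hdrop]
          have : x - w = (x - (w + 1)) + 1 := by omega
          rw [this, List.take_succ_cons]
        rw [htake]
        simp [wikidataCat, wikidataRep, hw]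
      · rw [ih (w + 1) _ (by omega) (by omega)]
        have hd1 : lst.drop w = [] := List.drop_eq_nil_of_le (by omega)
        have hd2 : lst.drop (w + 1) = [] := List.drop_eq_nil_of_le (by omega)
        simp [hd1, hd2, hw, wikidataCat]
  intro w s hle
  exact H (x - w) w s rfl hle


lemma wikidataEl (c : List String) (h : c ≠ []) :
    String.ofList (PySem.List.slice (wikidataCat c) (some 0)
        (some (((wikidataCat c).length : Int) - 1))) =
      PySem.Str.join "|" (c.map
        (fun e => PySem.Str.replace e "http://www.wikidata.org/entity/" "")) := by
  have hlen : 1 ≤ (wikidataCat c).length := by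
    cases c with
    | nil => simp at h
    | cons a t =>
      simp [wikidataCat]
      omega
  apply String.ext
  rw [show (((wikidataCat c).length : Int) - 1) = (((wikidataCat c).length - 1 : Nat) : Int) by omega]
  rw [PySem.List.slice_zero_start, PySem.List.slice_to_natCast, ← List.dropLast_eq_take,
    wikidataCat_dropLast c h]
  simp [PySem.Str.toList_join]
  congr 1
  apply List.map_congr_left
  intro e _
  simp [PySem.Str.toList_replace, wikidataRep]

lemma wikidataOuterA_spec (lst : List String) :
    ∀ fuel k res, lst.length ≤ 50 * k + 50 * fuel →
      wikidataOuterA lst fuel (50 * k) (50 * k + 50) [] res = res ++ wikidataChunks lst k := by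
  intro fuel
  induction fuel with
  | zero =>
    intro k res h
    rw [wikidataOuterA, wikidataChunks, if_neg (by omega)]
    simp
  | succ fuel ih =>
    intro k res h
    by_cases hk : 50 * k < lst.length
    · rw [wikidataOuterA, if_pos hk]
      rw [wikidataInnerA_spec lst (50 * k + 50) (50 * k) [] (by omega)]
      simp only [List.nil_append]
      rw [if_pos trivial]
      have hchunk : (lst.drop (50 * k)).take (50 * k + 50 - 50 * k) = (lst.drop (50 * k)).take 50 := by
        congr 1; omega
      rw [hchunk, wikidataEl ((lst.drop (50 * k)).take 50) (by
        simp [List.take_eq_nil_iff, List.drop_eq_nil_iff]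
        omega)]
      have h50 : 50 * k + 50 = 50 * (k + 1) := by ring
      rw [h50, ih (k + 1) _ (by omega)]
      conv_rhs => rw [wikidataChunks]
      rw [if_pos hk]
      simp
    · rw [wikidataOuterA, if_neg hk, wikidataChunks, if_neg hk]
      simp

-- B's per-index chunk, Nat-indexed
def wikidataG (lst : List String) (j : Nat) : String :=
  PySem.Str.join "|"
    ((PySem.List.slice lst (some ((50 * j : Nat) : Int)) (some (((50 * j : Nat) : Int) + ((50 : Nat) : Int)))).map
      (fun e => PySem.Str.replace e "http://www.wikidata.org/entity/" ""))

lemma wikidataChunks_eq_map (lst : List String) :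
    ∀ d k, (lst.length + 49) / 50 - k = d →
      (List.range d).map (fun j => wikidataG lst (k + j)) = wikidataChunks lst k := by
  intro d
  induction d with
  | zero =>
    intro k hd
    rw [wikidataChunks, if_neg (by omega)]
    simp
  | succ d ih =>
    intro k hd
    have hk : 50 * k < lst.length := by omega
    rw [wikidataChunks, if_pos hk, List.range_succ_eq_map, List.map_cons, List.map_map]
    have hfun : ((fun j => wikidataG lst (k + j)) ∘ Nat.succ) = fun j => wikidataG lst (k + 1 + j) := by
      funext j
      simp [Function.comp]
      congr 1
      omega
    rw [hfun, ih (k + 1) (by omega)]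
    congr 1
    simp only [Nat.add_zero]
    unfold wikidataG
    rw [PySem.List.slice_natCast_add lst (50 * k) 50]

lemma wikidataAlt_eq_chunks (lst : List String) :
    wikidata_api_data_preparation_alt lst = wikidataChunks lst 0 := by
  unfold wikidata_api_data_preparation_alt
  rw [PySem.List.foldl_append_singleton_eq_map, PySem.List.pyRange_of_pos 0 (lst.length : Int) (by norm_num)]
  simp only [List.nil_append]
  by_cases hn : 0 < lst.length
  · rw [if_pos (by exact_mod_cast hn)]
    have hM : (((lst.length : Int) - 0 + 50 - 1) / 50).toNat = (lst.length + 49) / 50 := by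
      have h1 : ((lst.length : Int) - 0 + 50 - 1) = ((lst.length + 49 : Nat) : Int) := by push_cast; ring
      rw [h1, show ((50 : Int)) = ((50 : Nat) : Int) from rfl, ← Int.natCast_div, Int.toNat_natCast]
    rw [hM, ← wikidataChunks_eq_map lst ((lst.length + 49) / 50) 0 (by omega)]
    rw [List.map_map]
    apply List.map_congr_left
    intro j _
    simp only [Function.comp, Nat.zero_add]
    unfold wikidataG
    rw [show (0 : Int) + 50 * (j : Int) = ((50 * j : Nat) : Int) by push_cast; ring]
    norm_cast
  · have h0 : lst.length = 0 := by omega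
    rw [if_neg (by simp [h0]), wikidataChunks, if_neg (by omega)]
    simp

-- ===== VERDICT (by name: the statement is the Claim_ definition above) =====
theorem wikidata_api_data_preparation_spec : Claim_equal_wikidata_api_data_preparation := by
  intro lst _
  unfold Spec_wikidata_api_data_preparation
  rw [wikidataAlt_eq_chunks]
  have h0 : wikidata_api_data_preparation lst = wikidataOuterA lst lst.length (50 * 0) (50 * 0 + 50) [] [] := rfl
  rw [h0, wikidataOuterA_spec lst lst.length 0 [] (by omega)]
  simp
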